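-- pv_equiv track=rewrite | github.com/tnv1154/Python-Ptit | PY01034_Doi cho cac chu so.py | mind
-- ===== SOURCE A (Python) =====
-- def mind(s, i):
--     tmp = i
--     for j in range(i+1, len(s)):
--         if int(s[j]) < int(s[i]):
--             if tmp == i:
--                 tmp = j
--             elif s[tmp] < s[j]:
--                 tmp = j
--     if s[tmp] < s[i]:
--         return tmp
--     return -1
-- ===== SOURCE B (Python) =====
-- def mind(s, i):
--     c = s[i]
--     vals = [int(s[j]) for j in range(i + 1, len(s))]
--     if not vals:
--         return -1
--     for v in range(int(c) - 1, -1, -1):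
--         for k, x in enumerate(vals):
--             if x == v:
--                 return i + 1 + k
--     return -1
-- ===== Notes on version B (the rewrite author's own statement) =====
-- stated objective: alternative
-- what changed: A makes one positional pass keeping a running best index; B parses the scanned digits once into a list and then searches the value domain: for each candidate value v from int(s[i])-1 down to 0 it scans for the first position after i holding v and returns at the first hit.
import Mathlib
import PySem

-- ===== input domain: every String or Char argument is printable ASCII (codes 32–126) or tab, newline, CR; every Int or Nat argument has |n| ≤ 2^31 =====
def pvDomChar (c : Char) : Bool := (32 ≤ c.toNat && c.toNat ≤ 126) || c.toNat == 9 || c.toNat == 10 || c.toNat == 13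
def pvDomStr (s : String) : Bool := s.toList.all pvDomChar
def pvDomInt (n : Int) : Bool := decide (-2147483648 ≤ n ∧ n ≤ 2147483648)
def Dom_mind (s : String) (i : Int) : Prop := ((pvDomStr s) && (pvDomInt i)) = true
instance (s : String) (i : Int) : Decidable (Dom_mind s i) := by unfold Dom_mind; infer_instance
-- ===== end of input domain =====

-- B replaces A's single positional pass with a running best by a value-domain search: it
-- parses the scanned digits once into a list, then for each candidate value v from
-- int(s[i])-1 down to 0 returns the first position after i holding v (objective: alternative).

-- ===== PORT A =====
-- int(s[j]) — exact when s[j] is a digit character and j is a valid Python index (Pre_ guarantees both)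
def pvInt (s : String) (j : Int) : Int :=
  match PySem.Str.pyGet? s j with
  | some c => (c.toNat : Int) - 48
  | none => 0
-- s[j] as a character — exact when j is a valid Python index (Pre_ guarantees it)
def pvCh (s : String) (j : Int) : Char := (PySem.Str.pyGet? s j).getD ' '

def mind (s : String) (i : Int) : Int :=
  let tmp := (PySem.List.pyRange (i+1) (PySem.Str.len s) 1).foldl
    (fun tmp j =>
      if pvInt s j < pvInt s i then
        if tmp = i then j
        else if pvCh s tmp < pvCh s j then j
        else tmp
      else tmp) i
  if pvCh s tmp < pvCh s i then tmp else -1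

-- ===== PORT B =====
-- int(c) for the single character c — exact when c is a digit (Pre_ guarantees it where evaluated)
def pvIntC (c : Char) : Int := (c.toNat : Int) - 48

def mind_alt (s : String) (i : Int) : Int :=
  let c := pvCh s i
  let vals := (PySem.List.pyRange (i+1) (PySem.Str.len s) 1).map (fun j => pvInt s j)
  if vals = [] then -1
  else
    match (PySem.List.pyRange (pvIntC c - 1) (-1) (-1)).findSome? (fun v =>
        (PySem.List.enumerate vals 0).findSome? (fun kx =>
          if kx.2 == v then some (i + 1 + kx.1) else none)) with
    | some j => j
    | none => -1

-- ===== PRECONDITION & SPEC =====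
-- Pre_ excludes exactly the inputs where A raises: i outside [-len(s), len(s)) (IndexError on
-- s[i]), or — when the loop body runs at all, i.e. i ≠ len(s)-1 — a non-digit character at one
-- of the scanned positions (ValueError from int()).
def Pre_mind (s : String) (i : Int) : Prop :=
  -(s.toList.length : Int) ≤ i ∧ i < (s.toList.length : Int) ∧
    (i = (s.toList.length : Int) - 1 ∨ (s.toList.drop i.toNat).all (fun c => c.isDigit) = true)
instance (s : String) (i : Int) : Decidable (Pre_mind s i) := by unfold Pre_mind; infer_instance

def pvWitness_mind : String × Int := ("35162", 1)

def Spec_mind (s : String) (i : Int) (out : Int) : Prop := out = mind_alt s i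
instance (s : String) (i : Int) (out : Int) : Decidable (Spec_mind s i out) := by unfold Spec_mind; infer_instance

-- ===== CLAIM (what is proved, stated in full; the proofs are below) =====
def Claim_equal_mind : Prop := ∀ (s : String) (i : Int), Dom_mind s i → Pre_mind s i → Spec_mind s i (mind s i)

-- ===== LEMMAS AND PROOFS =====

lemma findSome?_const_none {α β : Type} (l : List α) :
    l.findSome? (fun _ => (none : Option β)) = none := by
  induction l with
  | nil => rfl
  | cons x t ih => simp [List.findSome?, ih]

lemma findSome?_congr {α β : Type} {p q : α → Option β} (l : List α)
    (h : ∀ x ∈ l, p x = q x) : l.findSome? p = l.findSome? q := by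
  induction l with
  | nil => rfl
  | cons x t ih =>
    simp only [List.findSome?]
    rw [h x (by simp)]
    cases q x with
    | some b => rfl
    | none => exact ih (fun y hy => h y (by simp [hy]))

lemma pyRange_neg_one_append (a m b : Int) (h1 : b ≤ m) (h2 : m ≤ a) :
    PySem.List.pyRange a b (-1) =
      PySem.List.pyRange a m (-1) ++ PySem.List.pyRange m b (-1) := by
  rw [PySem.List.pyRange_neg_one_eq_reverse, PySem.List.pyRange_neg_one_eq_reverse,
    PySem.List.pyRange_neg_one_eq_reverse, ← List.reverse_append,
    ← PySem.List.pyRange_one_append (b+1) (m+1) (a+1) (by omega) (by omega)]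

lemma char_lt_iff (a b : Char) : a < b ↔ a.toNat < b.toNat := by
  rw [Char.lt_def, UInt32.lt_iff_toNat_lt]
  exact Iff.rfl

-- The core argument: A's left fold with running best tmp (current best value b; b = -1
-- while tmp = i, i.e. no candidate yet) equals a descending value search over (b, d).
lemma mind_main (f : Int → Int) (i d : Int) (hd : f i = d) :
    ∀ (l : List Int) (tmp b : Int),
      (∀ j ∈ l, 0 ≤ f j) →
      ((tmp = i ∧ b = -1) ∨ (tmp ≠ i ∧ b = f tmp ∧ 0 ≤ b)) → b < d →
      l.foldl (fun t j => if f j < d then (if t = i then j else if f t < f j then j else t) else t) tmp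
        = ((PySem.List.pyRange (d-1) b (-1)).findSome?
            (fun v => l.find? (fun j => f j == v))).getD tmp := by
  intro l
  induction l with
  | nil =>
    intro tmp b _ _ _
    simp [List.find?, findSome?_const_none]
  | cons j rest ih =>
    intro tmp b hnn hinv hbd
    have hj0 : 0 ≤ f j := hnn j (by simp)
    have hrest : ∀ k ∈ rest, 0 ≤ f k := fun k hk => hnn k (by simp [hk])
    by_cases hj : f j < d
    · by_cases hb : b < f j
      · -- j becomes the new best
        have hstep : (if f j < d then (if tmp = i then j else if f tmp < f j then j else tmp) else tmp) = j := by
          rcases hinv with ⟨hti, hbv⟩ | ⟨hti, hbv, _⟩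
          · simp [hj, hti]
          · have : f tmp < f j := by omega
            simp [hj, hti, this]
        have hji : j ≠ i := fun h => by rw [h, hd] at hj; omega
        have hIH := ih j (f j) hrest (Or.inr ⟨hji, rfl, hj0⟩) hj
        rw [List.foldl_cons, hstep, hIH]
        -- split the value range at f j
        rw [pyRange_neg_one_append (d-1) (f j) b (by omega) (by omega)]
        rw [List.findSome?_append]
        rw [PySem.List.pyRange_neg_one_cons hb]
        have hcongr : ((PySem.List.pyRange (d-1) (f j) (-1)).findSome?
              (fun v => (j :: rest).find? (fun k => f k == v)))
            = ((PySem.List.pyRange (d-1) (f j) (-1)).findSome?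
              (fun v => rest.find? (fun k => f k == v))) := by
          refine findSome?_congr _ (fun v hv => ?_)
          rw [PySem.List.mem_pyRange_neg_one] at hv
          have : (f j == v) = false := by simp; omega
          simp [List.find?, this]
        rw [hcongr]
        cases hR : (PySem.List.pyRange (d-1) (f j) (-1)).findSome?
            (fun v => rest.find? (fun k => f k == v)) with
        | some k => simp
        | none => simp [List.findSome?, List.find?]
      · -- f j ≤ b : j is not an improvement, tmp unchanged
        have hbfj : f j ≤ b := by omega
        rcases hinv with ⟨hti, hbv⟩ | ⟨hti, hbv, hb0⟩
        · omega
        · have hstep : (if f j < d then (if tmp = i then j else if f tmp < f j then j else tmp) else tmp) = tmp := by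
            have : ¬ f tmp < f j := by omega
            simp [hj, hti, this]
          have hIH := ih tmp b hrest (Or.inr ⟨hti, hbv, hb0⟩) hbd
          rw [List.foldl_cons, hstep, hIH]
          refine congrArg (Option.getD · tmp) (findSome?_congr _ (fun v hv => ?_)).symm
          rw [PySem.List.mem_pyRange_neg_one] at hv
          have : (f j == v) = false := by simp; omega
          simp [List.find?, this]
    · -- f j ≥ d : not a candidate
      have hstep : (if f j < d then (if tmp = i then j else if f tmp < f j then j else tmp) else tmp) = tmp := by
        simp [hj]
      have hIH := ih tmp b hrest hinv hbd
      rw [List.foldl_cons, hstep, hIH]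
      refine congrArg (Option.getD · tmp) (findSome?_congr _ (fun v hv => ?_)).symm
      rw [PySem.List.mem_pyRange_neg_one] at hv
      have : (f j == v) = false := by simp; omega
      simp [List.find?, this]

lemma pyGet?_some_of_valid (s : String) (j : Int)
    (h1 : -(s.toList.length : Int) ≤ j) (h2 : j < (s.toList.length : Int)) :
    ∃ c, PySem.Str.pyGet? s j = some c := by
  cases hc : PySem.Str.pyGet? s j with
  | some c => exact ⟨c, rfl⟩
  | none =>
    exfalso
    rw [PySem.Str.pyGet?_eq, PySem.Chars.pyGet?_eq_listPyGet?] at hc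
    have hni := (PySem.List.pyGet?_eq_none_iff (xs := s.toList) (i := j)).mp hc
    have hsl : s.toList.length = s.length := by simp
    exact hni (by simp [PySem.Raise.InRange]; omega)

lemma digit_bounds {c : Char} (h : c.isDigit) : 48 ≤ c.toNat ∧ c.toNat ≤ 57 := by
  simp [Char.isDigit, decide_eq_true_eq] at h
  constructor <;> [exact h.1; exact h.2]

lemma chlt_iff (s : String) (a b : Int)
    (ha1 : -(s.toList.length : Int) ≤ a) (ha2 : a < (s.toList.length : Int))
    (hb1 : -(s.toList.length : Int) ≤ b) (hb2 : b < (s.toList.length : Int)) :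
    (pvCh s a < pvCh s b) ↔ pvInt s a < pvInt s b := by
  obtain ⟨c1, hc1⟩ := pyGet?_some_of_valid s a ha1 ha2
  obtain ⟨c2, hc2⟩ := pyGet?_some_of_valid s b hb1 hb2
  unfold pvCh pvInt
  rw [hc1, hc2]
  simp only [Option.getD_some]
  rw [char_lt_iff]
  omega

-- A's comparison on characters equals the comparison on digit values, so the port's fold
-- equals the abstract fold of mind_main.
lemma fold_ch_eq_fold_int (s : String) (i : Int) :
    ∀ (l : List Int) (tmp : Int),
      (∀ j ∈ l, -(s.toList.length : Int) ≤ j ∧ j < (s.toList.length : Int)) →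
      (-(s.toList.length : Int) ≤ tmp ∧ tmp < (s.toList.length : Int)) →
      l.foldl (fun t j => if pvInt s j < pvInt s i then (if t = i then j else if pvCh s t < pvCh s j then j else t) else t) tmp
        = l.foldl (fun t j => if pvInt s j < pvInt s i then (if t = i then j else if pvInt s t < pvInt s j then j else t) else t) tmp := by
  intro l
  induction l with
  | nil => intro tmp _ _; rfl
  | cons j rest ih =>
    intro tmp hl htmp
    have hjv := hl j (by simp)
    have hrest : ∀ k ∈ rest, -(s.toList.length : Int) ≤ k ∧ k < (s.toList.length : Int) :=
      fun k hk => hl k (by simp [hk])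
    rw [List.foldl_cons, List.foldl_cons]
    have hcmp : (pvCh s tmp < pvCh s j) = (pvInt s tmp < pvInt s j) := by
      rw [eq_iff_iff]
      exact chlt_iff s tmp j htmp.1 htmp.2 hjv.1 hjv.2
    by_cases h1 : pvInt s j < pvInt s i
    · by_cases h2 : tmp = i
      · simp only [h1, if_true, h2]
        exact ih j hrest hjv
      · simp only [h1, if_true, if_neg h2, hcmp]
        by_cases h3 : pvInt s tmp < pvInt s j
        · simp only [h3, if_true]; exact ih j hrest hjv
        · simp only [h3, if_false]; exact ih tmp hrest htmp
    · simp only [h1, if_false]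
      exact ih tmp hrest htmp

-- every position scanned by the loop holds a digit (assuming the digit tail of Pre_)
lemma digit_at (s : String) (i j : Int)
    (h1 : -(s.toList.length : Int) ≤ i) (h2 : i < (s.toList.length : Int))
    (hd' : (s.toList.drop i.toNat).all (fun c => c.isDigit) = true)
    (hj1 : i ≤ j) (hj2 : j < (s.toList.length : Int)) :
    ∀ c, PySem.Str.pyGet? s j = some c → c.isDigit := by
  intro c hc
  have hd := List.all_eq_true.mp hd'
  by_cases hi : 0 ≤ i
  · -- j ≥ i ≥ 0 : the character sits at position j.toNat ≥ i.toNat, inside the dropped tail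
    have hj0 : 0 ≤ j := by omega
    rw [PySem.Str.pyGet?_eq, PySem.Chars.pyGet?_eq_listPyGet?,
      PySem.List.pyGet?_of_nonneg _ hj0] at hc
    have hjlen : j.toNat < s.toList.length := by omega
    have hij : i.toNat ≤ j.toNat := by omega
    apply hd
    have hlt : j.toNat - i.toNat < (s.toList.drop i.toNat).length := by
      rw [List.length_drop]; omega
    have hmem : (s.toList.drop i.toNat)[j.toNat - i.toNat] ∈ s.toList.drop i.toNat :=
      List.getElem_mem hlt
    have heq : (s.toList.drop i.toNat)[j.toNat - i.toNat] = s.toList[j.toNat]'hjlen := by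
      rw [List.getElem_drop]
      congr 1
      omega
    have : s.toList[j.toNat]? = some c := hc
    rw [List.getElem?_eq_getElem hjlen] at this
    injection this with h
    rw [← h, ← heq]
    exact hmem
  · -- i < 0 : the whole string is digits
    have h0 : i.toNat = 0 := by omega
    rw [h0, List.drop_zero] at hd
    apply hd
    rw [PySem.Str.pyGet?_eq, PySem.Chars.pyGet?_eq_listPyGet?] at hc
    exact PySem.List.mem_of_pyGet?_eq_some _ hc

-- the inner enumerate scan over vals = [f(j) for j in l] finds exactly l's first j with f j = v
lemma enum_scan (f : Int → Int) (v a : Int) :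
    ∀ (l : List Int) (t : Int), (∀ k (h : k < l.length), l[k] = a + t + k) →
      (PySem.List.enumerate (l.map f) t).findSome?
          (fun kx => if kx.2 == v then some (a + kx.1) else none)
        = l.find? (fun j => f j == v) := by
  intro l
  induction l with
  | nil => intro t _; simp [PySem.List.enumerate]
  | cons j rest ih =>
    intro t hl
    have hj : j = a + t := by
      have := hl 0 (by simp)
      simpa using this
    rw [List.map_cons,
      show PySem.List.enumerate (f j :: rest.map f) t
        = (t, f j) :: PySem.List.enumerate (rest.map f) (t+1) from by simp [PySem.List.enumerate]]
    have hrest : ∀ k (h : k < rest.length), rest[k] = a + (t+1) + k := by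
      intro k h
      have h2 := hl (k+1) (by simpa using Nat.succ_lt_succ h)
      have h3 : ((j :: rest)[k+1]'(by simpa using Nat.succ_lt_succ h)) = rest[k]'h := by simp
      rw [h3] at h2
      push_cast at h2 ⊢
      omega
    by_cases hfv : f j = v
    · have hfv' : f (a + t) = v := by rw [← hj]; exact hfv
      simp [List.findSome?, List.find?, hfv', hj]
    · have hb : (f j == v) = false := by simp [hfv]
      simp only [List.findSome?, List.find?, hb, Bool.false_eq_true, if_false]
      simpa using ih (t+1) hrest

-- ===== VERDICT (by name: the statement is the Claim_ definition above) =====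
theorem mind_spec : Claim_equal_mind := by
  intro s i _ hpre
  obtain ⟨h1, h2, hrest⟩ := hpre
  unfold Spec_mind
  simp only [mind, mind_alt]
  have hlen : PySem.Str.len s = (s.toList.length : Int) := by
    simp [PySem.Str.len_eq]
  set n : Int := (s.toList.length : Int) with hn
  set l := PySem.List.pyRange (i+1) (PySem.Str.len s) 1 with hl
  by_cases hcor : i = n - 1
  · -- empty loop: A returns -1 without looking at any other character, and so does B
    have hl0 : l = [] := by
      rw [hl, hlen]
      exact PySem.List.pyRange_one_eq_nil (by omega)
    rw [hl0]
    simp [List.foldl_nil]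
  · -- the loop runs: every scanned position (and position i) holds a digit
    have hdig0 : (s.toList.drop i.toNat).all (fun c => c.isDigit) = true :=
      hrest.resolve_left hcor
    have hlne : l ≠ [] := by
      rw [hl, hlen]
      intro h
      have := congrArg List.length h
      rw [PySem.List.length_pyRange_one] at this
      simp at this
      omega
    have hmeml : ∀ j ∈ l, i + 1 ≤ j ∧ j < n := by
      intro j hj
      rw [hl, hlen, PySem.List.mem_pyRange_one] at hj
      exact hj
    have hvalid : ∀ j ∈ l, -n ≤ j ∧ j < n := fun j hj => by
      have := hmeml j hj; omega
    obtain ⟨ci, hci⟩ := pyGet?_some_of_valid s i h1 h2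
    have hcib := digit_bounds (digit_at s i i h1 h2 hdig0 le_rfl h2 ci hci)
    have hchi : pvCh s i = ci := by unfold pvCh; rw [hci]; rfl
    have hdi : pvInt s i = (ci.toNat : Int) - 48 := by unfold pvInt; rw [hci]
    have hdic : pvIntC (pvCh s i) = pvInt s i := by rw [hchi, hdi]; rfl
    have hdig : ∀ j ∈ l, 0 ≤ pvInt s j := by
      intro j hj
      have hjb := hmeml j hj
      obtain ⟨c, hc⟩ := pyGet?_some_of_valid s j (by omega) (by omega)
      have hb := digit_bounds (digit_at s i j h1 h2 hdig0 (by omega) (by omega) c hc)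
      have hv : pvInt s j = (c.toNat : Int) - 48 := by unfold pvInt; rw [hc]
      rw [hv]; omega
    -- drop B's emptiness branch and collapse the enumerate scan
    rw [if_neg (show ¬ l.map (fun j => pvInt s j) = [] by simpa using hlne)]
    have hidx : ∀ k (h : k < l.length), l[k] = (i+1) + (0:Int) + k := by
      intro k h
      simp only [hl] at h ⊢
      rw [PySem.List.getElem_pyRange_one]
      omega
    have hinner : ∀ v, (PySem.List.enumerate (l.map (fun j => pvInt s j)) 0).findSome?
          (fun kx => if kx.2 == v then some (i + 1 + kx.1) else none)
        = l.find? (fun j => pvInt s j == v) := fun v =>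
      enum_scan (fun j => pvInt s j) v (i+1) l 0 hidx
    rw [hdic, findSome?_congr (q := fun v => l.find? (fun j => pvInt s j == v)) _
      (fun v _ => hinner v)]
    -- rewrite A: character comparisons = value comparisons, then the core lemma
    rw [fold_ch_eq_fold_int s i l i hvalid ⟨h1, h2⟩]
    have hmain := mind_main (pvInt s) i (pvInt s i) rfl l i (-1) hdig
      (Or.inl ⟨rfl, rfl⟩) (by omega)
    rw [hmain]
    cases hR : (PySem.List.pyRange (pvInt s i - 1) (-1) (-1)).findSome?
        (fun v => l.find? (fun j => pvInt s j == v)) with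
    | some k =>
      obtain ⟨v, hv, hfind⟩ := List.exists_of_findSome?_eq_some hR
      rw [PySem.List.mem_pyRange_neg_one] at hv
      have hkmem : k ∈ l := List.mem_of_find?_eq_some hfind
      have hkval : pvInt s k = v := by
        have := List.find?_some hfind
        simpa using this
      have hkv := hvalid k hkmem
      have hklt : pvInt s k < pvInt s i := by omega
      have : pvCh s k < pvCh s i :=
        (chlt_iff s k i hkv.1 hkv.2 h1 h2).mpr hklt
      simp [this]
    | none =>
      simp
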